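-- pv_equiv track=rewrite | github.com/Yostage/advent-of-code | 2022/day8.py | viewable_trees_in_slice
-- ===== SOURCE A (Python) =====
-- from typing import Any, Dict, List
--
-- def viewable_trees_in_slice(this_tree: int, slice: List[int]) -> int:
--     # min_viewable = this_tree
--     viewed = 0
--     for candidate in slice:
--         if candidate < this_tree:
--             viewed += 1
--         else:
--             return viewed + 1
--             min_viewable = candidate
--
--     return viewed
-- ===== SOURCE B (Python) =====
-- def viewable_trees_in_slice(this_tree, slice):
--     # Divide and conquer: each segment yields (trees seen, whether the view
--     # was blocked inside it); halves combine by "left blocked wins, else add".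
--     def go(seg):
--         if len(seg) == 0:
--             return (0, False)
--         if len(seg) == 1:
--             return (1, seg[0] >= this_tree)
--         m = len(seg) // 2
--         c1, b1 = go(seg[:m])
--         if b1:
--             return (c1, True)
--         c2, b2 = go(seg[m:])
--         return (c1 + c2, b2)
--     return go(slice)[0]
-- ===== Notes on version B (the rewrite author's own statement) =====
-- stated objective: alternative
-- what changed: Replaces A's left-to-right loop with a running 'viewed' counter and early return by a divide-and-conquer recursion: each half-segment returns a (count, blocked) pair and halves are combined by 'if the left half is blocked keep its pair, otherwise add counts and take the right half's blocked flag'.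
import Mathlib
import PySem

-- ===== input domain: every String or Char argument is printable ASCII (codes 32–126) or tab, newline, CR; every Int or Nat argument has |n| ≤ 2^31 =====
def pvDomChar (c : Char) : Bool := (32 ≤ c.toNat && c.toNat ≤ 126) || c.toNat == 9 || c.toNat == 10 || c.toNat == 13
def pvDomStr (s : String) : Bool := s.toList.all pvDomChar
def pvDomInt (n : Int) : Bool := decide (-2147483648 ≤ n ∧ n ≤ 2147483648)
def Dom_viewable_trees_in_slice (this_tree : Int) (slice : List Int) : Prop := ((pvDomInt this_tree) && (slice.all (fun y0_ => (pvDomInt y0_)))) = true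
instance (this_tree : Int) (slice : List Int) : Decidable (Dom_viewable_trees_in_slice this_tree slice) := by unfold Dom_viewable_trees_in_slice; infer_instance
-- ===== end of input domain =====

-- B replaces A's accumulator loop with a divide-and-conquer recursion combining (count, blocked) pairs of half-segments: alternative decomposition, same result.

-- ===== PORT A =====
-- A: loop with accumulator 'viewed'; early return viewed+1 on the first candidate ≥ this_tree.
def viewable_trees_in_slice_loop (this_tree : Int) (viewed : Int) : List Int → Int
  | [] => viewed
  | candidate :: rest =>
      if candidate < this_tree then viewable_trees_in_slice_loop this_tree (viewed + 1) rest
      else viewed + 1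

def viewable_trees_in_slice (this_tree : Int) (slice : List Int) : Int :=
  viewable_trees_in_slice_loop this_tree 0 slice

-- ===== PORT B =====
-- B's inner go: segment → (trees seen, blocked?); halves split at len//2 and combined.
def viewable_trees_in_slice_go (this_tree : Int) (seg : List Int) : Int × Bool :=
  match seg with
  | [] => (0, false)
  | [c] => (1, decide (c ≥ this_tree))
  | a :: b :: l =>
      let m := (a :: b :: l).length / 2
      let p1 := viewable_trees_in_slice_go this_tree ((a :: b :: l).take m)
      if p1.2 then (p1.1, true)
      else
        let p2 := viewable_trees_in_slice_go this_tree ((a :: b :: l).drop m)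
        (p1.1 + p2.1, p2.2)
termination_by seg.length
decreasing_by
  · simp [List.length_take]; omega
  · simp [List.length_drop]; omega

def viewable_trees_in_slice_alt (this_tree : Int) (slice : List Int) : Int :=
  (viewable_trees_in_slice_go this_tree slice).1

-- ===== PRECONDITION & SPEC =====
def Spec_viewable_trees_in_slice (this_tree : Int) (slice : List Int) (out : Int) : Prop := out = viewable_trees_in_slice_alt this_tree slice
instance (this_tree : Int) (slice : List Int) (out : Int) : Decidable (Spec_viewable_trees_in_slice this_tree slice out) := by unfold Spec_viewable_trees_in_slice; infer_instance

-- ===== CLAIM =====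
def Claim_equal_viewable_trees_in_slice : Prop := ∀ (this_tree : Int) (slice : List Int), Dom_viewable_trees_in_slice this_tree slice → Spec_viewable_trees_in_slice this_tree slice (viewable_trees_in_slice this_tree slice)

-- ===== LEMMAS AND PROOFS =====

-- A's loop shifted by its accumulator.
theorem vts_loop_shift (t : Int) : ∀ (l : List Int) (k : Int),
    viewable_trees_in_slice_loop t k l = k + viewable_trees_in_slice_loop t 0 l := by
  intro l
  induction l with
  | nil => intro k; simp [viewable_trees_in_slice_loop]
  | cons c rest ih =>
      intro k
      by_cases hc : c < t
      · simp only [viewable_trees_in_slice_loop, if_pos hc]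
        rw [ih (k + 1), ih (0 + 1)]; ring
      · simp only [viewable_trees_in_slice_loop, if_neg hc]; ring

-- On an unblocked segment A's loop counts the whole segment.
theorem vts_loop_all_small (t : Int) : ∀ (l : List Int) (k : Int),
    l.any (fun c => decide (t ≤ c)) = false →
    viewable_trees_in_slice_loop t k l = k + l.length := by
  intro l
  induction l with
  | nil => intro k _; simp [viewable_trees_in_slice_loop]
  | cons c rest ih =>
      intro k h
      simp only [List.any_cons, Bool.or_eq_false_iff, decide_eq_false_iff_not, not_le] at h
      simp only [viewable_trees_in_slice_loop, if_pos h.1]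
      rw [ih (k + 1) (by simpa using h.2)]
      simp only [List.length_cons]; push_cast; ring

-- A's loop on an append: the left part decides whether the right is reached.
theorem vts_loop_append (t : Int) : ∀ (l1 l2 : List Int) (k : Int),
    viewable_trees_in_slice_loop t k (l1 ++ l2) =
      if l1.any (fun c => decide (t ≤ c)) then viewable_trees_in_slice_loop t k l1
      else viewable_trees_in_slice_loop t (k + l1.length) l2 := by
  intro l1
  induction l1 with
  | nil => intro l2 k; simp
  | cons c rest ih =>
      intro l2 k
      by_cases hc : c < t
      · have h2 : ¬ t ≤ c := by omega
        simp only [List.cons_append, viewable_trees_in_slice_loop, if_pos hc,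
          List.any_cons, h2, decide_false, Bool.false_or]
        rw [ih l2 (k + 1)]
        split_ifs with h
        · rfl
        · congr 1
          push_cast [List.length_cons]; ring
      · have h2 : t ≤ c := by omega
        simp [List.cons_append, viewable_trees_in_slice_loop, if_neg hc, h2]

-- Characterisation of B's divide-and-conquer pair by A's loop and a blocked flag.
theorem vts_go_spec (t : Int) : ∀ (n : Nat) (seg : List Int), seg.length ≤ n →
    viewable_trees_in_slice_go t seg =
      (viewable_trees_in_slice_loop t 0 seg, seg.any (fun c => decide (t ≤ c))) := by
  intro n
  induction n with
  | zero =>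
      intro seg h
      have : seg = [] := List.length_eq_zero_iff.mp (Nat.le_zero.mp h)
      subst this
      simp [viewable_trees_in_slice_go, viewable_trees_in_slice_loop]
  | succ n ih =>
      intro seg h
      match seg with
      | [] => simp [viewable_trees_in_slice_go, viewable_trees_in_slice_loop]
      | [c] =>
          simp only [viewable_trees_in_slice_go, viewable_trees_in_slice_loop, List.any_cons,
            List.any_nil, Bool.or_false, ge_iff_le]
          by_cases hc : c < t
          · rw [if_pos hc]
            simp
          · rw [if_neg hc]
            norm_num
      | a :: b :: l =>
          have hlen : (a :: b :: l).length = l.length + 2 := by simp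
          set s := a :: b :: l with hs
          have h2 : 2 ≤ s.length := by rw [hs]; simp only [List.length_cons]; omega
          set m := s.length / 2 with hm
          have hm1 : 1 ≤ m := by omega
          have hmlt : m < s.length := by omega
          have htake : (s.take m).length = m := by simp [List.length_take]; omega
          have hdrop : (s.drop m).length = s.length - m := by simp [List.length_drop]
          have ht1 : (s.take m).length ≤ n := by rw [htake]; omega
          have ht2 : (s.drop m).length ≤ n := by rw [hdrop]; omega
          have hsplit : s.take m ++ s.drop m = s := List.take_append_drop m s
          rw [show viewable_trees_in_slice_go t s =
              (let p1 := viewable_trees_in_slice_go t (s.take m)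
               if p1.2 then (p1.1, true)
               else
                 let p2 := viewable_trees_in_slice_go t (s.drop m)
                 (p1.1 + p2.1, p2.2)) from by
            conv_lhs => rw [hs, viewable_trees_in_slice_go]]
          rw [ih (s.take m) ht1, ih (s.drop m) ht2]
          simp only []
          have hA : viewable_trees_in_slice_loop t 0 s =
              viewable_trees_in_slice_loop t 0 (s.take m ++ s.drop m) := by rw [hsplit]
          have hAny : s.any (fun c => decide (t ≤ c)) =
              ((s.take m).any (fun c => decide (t ≤ c)) ||
               (s.drop m).any (fun c => decide (t ≤ c))) := by
            rw [← List.any_append, hsplit]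
          by_cases hb : (s.take m).any (fun c => decide (t ≤ c))
          · rw [if_pos (by simpa using hb)]
            rw [hA, vts_loop_append, if_pos hb, hAny, hb]
            simp
          · rw [if_neg (by simpa using hb)]
            have hb' : (s.take m).any (fun c => decide (t ≤ c)) = false := by
              simpa using hb
            rw [hA, vts_loop_append, if_neg (by simp [hb']), hAny, hb']
            rw [vts_loop_shift t (s.drop m) (0 + (s.take m).length),
                vts_loop_all_small t (s.take m) 0 hb']
            simp only [Bool.false_or]

-- ===== VERDICT =====
theorem viewable_trees_in_slice_spec : Claim_equal_viewable_trees_in_slice := by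
  intro this_tree slice _
  unfold Spec_viewable_trees_in_slice viewable_trees_in_slice viewable_trees_in_slice_alt
  rw [vts_go_spec this_tree slice.length slice le_rfl]
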